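-- pv_equiv track=rewrite | github.com/uhlmanngroup/MorphoDynamicsPipe | scripts/useful_functions.py | get_list_from_string
-- ===== SOURCE A (Python) =====
-- def get_list_from_string(mystring, variable, delimiter):
--     #chooses the list in a string that is separated by a delimiter and ended by next dot slash or underscore
--     i_start = mystring.find(variable) + len(variable) + 1
--     mystring_afterstart = mystring[i_start:]
--
--     list_of_possible_stop_char = ['.', '/', '_']
--     dist_of_next_chars = []
--     for each in list_of_possible_stop_char:
--         if each in mystring_afterstart:
--             dist_of_next_chars.append(mystring_afterstart.find(each))
--
--     if len(dist_of_next_chars) != 0: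
--         i_end = min(dist_of_next_chars) + i_start
--         liststring = mystring[i_start:i_end]
--     elif len(dist_of_next_chars) == 0:
--         liststring = mystring[i_start:]
--
--     return liststring.split(delimiter)
-- ===== SOURCE B (Python) =====
-- def get_list_from_string(mystring, variable, delimiter):
--     # B: same i_start arithmetic, then ONE left-to-right scan that stops at the
--     # first '.', '/' or '_' instead of three .find() calls and a min().
--     i_start = mystring.find(variable) + len(variable) + 1
--     liststring = ''
--     for ch in mystring[i_start:]:
--         if ch in './_':
--             break
--         liststring += ch
--     return liststring.split(delimiter)
-- ===== Notes on version B (the rewrite author's own statement) =====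
-- stated objective: simpler
-- what changed: Replaces the three per-stop-char find() calls, the list of distances and the min()/branching on it by a single left-to-right scan that accumulates characters until the first '.', '/' or '_'.
import Mathlib
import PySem

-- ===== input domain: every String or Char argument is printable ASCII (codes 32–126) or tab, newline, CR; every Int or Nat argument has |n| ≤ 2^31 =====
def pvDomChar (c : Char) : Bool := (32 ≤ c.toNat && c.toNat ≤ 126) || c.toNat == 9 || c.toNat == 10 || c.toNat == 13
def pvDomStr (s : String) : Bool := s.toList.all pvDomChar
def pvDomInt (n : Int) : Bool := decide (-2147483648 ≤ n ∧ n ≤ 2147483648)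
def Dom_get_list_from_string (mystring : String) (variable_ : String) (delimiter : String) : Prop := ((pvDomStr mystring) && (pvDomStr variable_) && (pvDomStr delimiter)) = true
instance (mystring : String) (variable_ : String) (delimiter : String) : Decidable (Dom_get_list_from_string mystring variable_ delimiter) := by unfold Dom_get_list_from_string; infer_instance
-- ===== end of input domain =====

-- B replaces A's three find()-then-min passes over the tail by one scan that stops at the
-- first '.', '/' or '_' (objective: simpler, same result).

-- ===== PORT A =====
def get_list_from_string (mystring : String) (variable_ : String) (delimiter : String) : List String :=
  let s := mystring.toList
  let i_start : Int := PySem.Chars.find s variable_.toList + (variable_.toList.length : Int) + 1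
  let mystring_afterstart := PySem.List.slice s (some i_start) none
  let dists := List.foldl
    (fun acc each => if PySem.Chars.isIn [each] mystring_afterstart
                     then acc ++ [PySem.Chars.find mystring_afterstart [each]] else acc)
    [] ['.', '/', '_']
  let liststring := if dists.length ≠ 0
    then PySem.List.slice s (some i_start) (some (PySem.List.minD dists id 0 + i_start))
    else PySem.List.slice s (some i_start) none
  ((PySem.Chars.split? liststring delimiter.toList).getD []).map (fun cs => String.ofList cs)

-- ===== PORT B =====
-- the for-loop of Source B: accumulate characters until the first stop char, then break
def scanStop : List Char → List Char
  | [] => []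
  | c :: rest => if c = '.' ∨ c = '/' ∨ c = '_' then [] else c :: scanStop rest

def get_list_from_string_alt (mystring : String) (variable_ : String) (delimiter : String) : List String :=
  let i_start : Int := PySem.Chars.find mystring.toList variable_.toList + (variable_.toList.length : Int) + 1
  let liststring := scanStop (PySem.List.slice mystring.toList (some i_start) none)
  ((PySem.Chars.split? liststring delimiter.toList).getD []).map (fun cs => String.ofList cs)

-- ===== PRECONDITION & SPEC =====
-- Pre_ excludes only the empty delimiter, on which A's str.split raises ValueError.
def Pre_get_list_from_string (mystring : String) (variable_ : String) (delimiter : String) : Prop :=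
  delimiter ≠ ""
instance (mystring : String) (variable_ : String) (delimiter : String) : Decidable (Pre_get_list_from_string mystring variable_ delimiter) := by unfold Pre_get_list_from_string; infer_instance
def pvWitness_get_list_from_string : String × String × String := ("abc_var=1,2.txt", "var", ",")

def Spec_get_list_from_string (mystring : String) (variable_ : String) (delimiter : String) (out : List String) : Prop := out = get_list_from_string_alt mystring variable_ delimiter
instance (mystring : String) (variable_ : String) (delimiter : String) (out : List String) : Decidable (Spec_get_list_from_string mystring variable_ delimiter out) := by unfold Spec_get_list_from_string; infer_instance

-- ===== CLAIM (what is proved, stated in full; the proofs are below) =====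
def Claim_equal_get_list_from_string : Prop := ∀ (mystring : String) (variable_ : String) (delimiter : String), Dom_get_list_from_string mystring variable_ delimiter → Pre_get_list_from_string mystring variable_ delimiter → Spec_get_list_from_string mystring variable_ delimiter (get_list_from_string mystring variable_ delimiter)

-- ===== LEMMAS AND PROOFS =====

def isStop (c : Char) : Bool := c == '.' || c == '/' || c == '_'

theorem scanStop_eq_take_findIdx (t : List Char) :
    scanStop t = t.take (t.findIdx isStop) := by
  induction t with
  | nil => rfl
  | cons c rest ih =>
    rw [scanStop, List.findIdx_cons]
    by_cases h : isStop c = true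
    · have hc : c = '.' ∨ c = '/' ∨ c = '_' := by
        simp [isStop] at h; tauto
      simp [hc, h]
    · have hc : ¬ (c = '.' ∨ c = '/' ∨ c = '_') := by
        simp [isStop] at h; tauto
      simp [hc, h, ih]

theorem singleton_prefix_drop {l : List Char} {c : Char} {i : Nat} (h : i < l.length)
    (hc : l[i] = c) : [c] <+: List.drop i l := by
  have h2 := List.getElem_cons_drop (as := l) (i := i) h
  rw [hc] at h2; rw [← h2]; simp

theorem singleton_prefix_drop_elim {l : List Char} {c : Char} {i : Nat}
    (hp : [c] <+: List.drop i l) : i < l.length ∧ l[i]? = some c := by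
  by_cases h : i < l.length
  · have h2 := List.getElem_cons_drop (as := l) (i := i) h
    rw [← h2] at hp
    obtain ⟨u, hu⟩ := hp
    rw [List.singleton_append] at hu
    injection hu with h1 _
    exact ⟨h, by simp [h, h1]⟩
  · exfalso
    rw [List.drop_eq_nil_of_le (by omega)] at hp
    obtain ⟨u, hu⟩ := hp
    simp at hu

theorem isIn_singleton_iff (c : Char) (t : List Char) :
    PySem.Chars.isIn [c] t = true ↔ c ∈ t := by
  rw [PySem.Chars.isIn_iff_infix]
  constructor
  · intro ⟨l1, l2, h⟩
    rw [← h]; simp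
  · intro hc
    obtain ⟨l1, l2, rfl⟩ := List.append_of_mem hc
    exact ⟨l1, l2, by simp⟩

-- c occurs in t: find t [c] is exactly the first index of c
theorem find_singleton_of_mem {t : List Char} {c : Char} (hc : c ∈ t) :
    0 ≤ PySem.Chars.find t [c] ∧
    (PySem.Chars.find t [c]).toNat < t.length ∧
    t[(PySem.Chars.find t [c]).toNat]? = some c ∧
    ∀ i < (PySem.Chars.find t [c]).toNat, t[i]? ≠ some c := by
  have hinf : [c] <:+: t := by
    obtain ⟨l1, l2, rfl⟩ := List.append_of_mem hc
    exact ⟨l1, l2, by simp⟩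
  have h0 : 0 ≤ PySem.Chars.find t [c] := (PySem.Chars.find_nonneg_iff t [c]).mpr hinf
  obtain ⟨hpre, hmin⟩ := PySem.Chars.find_spec h0
  obtain ⟨hlt, hget⟩ := singleton_prefix_drop_elim hpre
  refine ⟨h0, hlt, hget, ?_⟩
  intro i hi hcontra
  have hil : i < t.length := Nat.lt_trans hi hlt
  have hti : t[i] = c := by simpa [List.getElem?_eq_getElem hil] using hcontra
  exact hmin i hi (singleton_prefix_drop hil hti)

-- for a stop char stops-list membership is isStop
theorem mem_stops_iff (c : Char) : c ∈ ['.', '/', '_'] ↔ isStop c = true := by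
  simp [isStop]; tauto

-- the min-of-finds selection on a tail t equals the single scan
theorem core_eq (t : List Char) :
    (if (List.map (fun each => PySem.Chars.find t [each])
          (List.filter (fun each => PySem.Chars.isIn [each] t) ['.', '/', '_'])).length ≠ 0
     then List.take (PySem.List.minD (List.map (fun each => PySem.Chars.find t [each])
          (List.filter (fun each => PySem.Chars.isIn [each] t) ['.', '/', '_'])) id 0).toNat t
     else t) = scanStop t := by
  rw [scanStop_eq_take_findIdx]
  set dists := List.map (fun each => PySem.Chars.find t [each])
      (List.filter (fun each => PySem.Chars.isIn [each] t) ['.', '/', '_']) with hd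
  by_cases hex : ∃ c ∈ t, isStop c = true
  · -- some stop char occurs at index k = findIdx isStop t
    have hk : List.findIdx isStop t < t.length := List.findIdx_lt_length.mpr hex
    set k := List.findIdx isStop t with hkdef
    have hkstop : isStop t[k] = true := List.findIdx_getElem (w := hk)
    have hct : t[k] ∈ t := List.getElem_mem hk
    -- every distance is ≥ k
    have hall : ∀ d ∈ dists, (k : Int) ≤ d := by
      intro d hdm
      rw [hd] at hdm
      obtain ⟨e, heF, rfl⟩ := List.mem_map.mp hdm
      have heIn := (List.mem_filter.mp heF).2
      have heStop : isStop e = true := (mem_stops_iff e).mp (List.mem_filter.mp heF).1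
      have heT : e ∈ t := (isIn_singleton_iff e t).mp heIn
      obtain ⟨h0f, hlt, hget, _⟩ := find_singleton_of_mem heT
      have hje : t[(PySem.Chars.find t [e]).toNat] = e := by
        have := List.getElem?_eq_getElem hlt
        rw [this] at hget; injection hget
      have : ¬ (PySem.Chars.find t [e]).toNat < k := by
        intro hlt2
        have hfalse : isStop (t[(PySem.Chars.find t [e]).toNat]'hlt) = false :=
          List.not_of_lt_findIdx (p := isStop) (xs := t) hlt2
        rw [hje] at hfalse
        rw [hfalse] at heStop; exact Bool.noConfusion heStop
      omega
    -- k itself is a distance (for the stop char at index k)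
    have hkin : (k : Int) ∈ dists := by
      rw [hd]
      refine List.mem_map.mpr ⟨t[k], List.mem_filter.mpr
        ⟨(mem_stops_iff _).mpr hkstop, (isIn_singleton_iff _ t).mpr hct⟩, ?_⟩
      obtain ⟨h0f, hlt, hget, hmin⟩ := find_singleton_of_mem hct
      have hje : t[(PySem.Chars.find t [t[k]]).toNat] = t[k] := by
        have := List.getElem?_eq_getElem hlt
        rw [this] at hget; injection hget
      have h1 : ¬ (PySem.Chars.find t [t[k]]).toNat < k := by
        intro hlt2
        have hfalse : isStop (t[(PySem.Chars.find t [t[k]]).toNat]'hlt) = false :=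
          List.not_of_lt_findIdx (p := isStop) (xs := t) hlt2
        rw [hje] at hfalse
        rw [hfalse] at hkstop; exact Bool.noConfusion hkstop
      have h2 : ¬ k < (PySem.Chars.find t [t[k]]).toNat := by
        intro hlt2
        exact hmin k hlt2 (List.getElem?_eq_getElem hk)
      omega
    have hne : dists ≠ [] := List.ne_nil_of_mem hkin
    rw [if_pos (Nat.pos_iff_ne_zero.mp (List.length_pos_of_ne_nil hne))]
    have hm : PySem.List.min? dists id = some (PySem.List.minD dists id 0) :=
      PySem.List.min?_eq_some_minD dists id 0 hne
    have hle : PySem.List.minD dists id 0 ≤ (k : Int) := by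
      have := PySem.List.min?_isMin hm (k : Int) hkin
      simpa using this
    have hge : (k : Int) ≤ PySem.List.minD dists id 0 :=
      hall _ (PySem.List.min?_mem hm)
    have : PySem.List.minD dists id 0 = (k : Int) := le_antisymm hle hge
    rw [this]
    simp
  · -- no stop char in t
    have hfil : List.filter (fun each => PySem.Chars.isIn [each] t) ['.', '/', '_'] = [] := by
      rw [List.filter_eq_nil_iff]
      intro e he hin
      exact hex ⟨e, (isIn_singleton_iff e t).mp hin, (mem_stops_iff e).mp he⟩
    rw [hd, hfil]
    have hki : List.findIdx isStop t = t.length := by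
      rw [List.findIdx_eq_length]
      intro x hx
      by_contra hb
      exact hex ⟨x, hx, by revert hb; cases isStop x <;> simp⟩
    rw [hki]
    simp
-- after rewriting the slices, the whole selection on s from i_start equals the scan of the tail
theorem core_final (s : List Char) (i_start : Int) (h0 : 0 ≤ i_start) :
    (if (List.foldl
          (fun acc each => if PySem.Chars.isIn [each] (PySem.List.slice s (some i_start) none)
                           then acc ++ [PySem.Chars.find (PySem.List.slice s (some i_start) none) [each]] else acc)
          [] ['.', '/', '_']).length ≠ 0
     then PySem.List.slice s (some i_start)
            (some (PySem.List.minD (List.foldl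
              (fun acc each => if PySem.Chars.isIn [each] (PySem.List.slice s (some i_start) none)
                               then acc ++ [PySem.Chars.find (PySem.List.slice s (some i_start) none) [each]] else acc)
              [] ['.', '/', '_']) id 0 + i_start))
     else PySem.List.slice s (some i_start) none) =
    scanStop (PySem.List.slice s (some i_start) none) := by
  have hs : PySem.List.slice s (some i_start) none = List.drop i_start.toNat s :=
    PySem.List.slice_from s h0
  rw [hs]
  set t := List.drop i_start.toNat s with htdef
  rw [PySem.List.foldl_append_if (fun each => PySem.Chars.isIn [each] t)
      (fun each => PySem.Chars.find t [each]) ['.', '/', '_'] []]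
  rw [List.nil_append]
  set dists := List.map (fun each => PySem.Chars.find t [each])
      (List.filter (fun each => PySem.Chars.isIn [each] t) ['.', '/', '_']) with hd
  have hcore := core_eq t
  rw [← hd] at hcore
  by_cases hne : dists.length ≠ 0
  · rw [if_pos hne] at hcore ⊢
    -- the minimum is a find of a present char, hence nonnegative
    have hm : PySem.List.min? dists id = some (PySem.List.minD dists id 0) :=
      PySem.List.min?_eq_some_minD dists id 0 (by
        intro h; rw [h] at hne; exact hne rfl)
    have hmem := PySem.List.min?_mem hm
    rw [hd] at hmem
    obtain ⟨e, heF, hme⟩ := List.mem_map.mp hmem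
    have heT : e ∈ t := (isIn_singleton_iff e t).mp (List.mem_filter.mp heF).2
    have hm0 : 0 ≤ PySem.List.minD dists id 0 := by
      rw [← hme]; exact (find_singleton_of_mem heT).1
    -- slice arithmetic: s[i : m+i] = (drop i s).take m for 0 ≤ i, 0 ≤ m
    have hia : i_start = ((i_start.toNat : Nat) : Int) := (Int.toNat_of_nonneg h0).symm
    have hmb : PySem.List.minD dists id 0 + i_start
        = (((PySem.List.minD dists id 0).toNat + i_start.toNat : Nat) : Int) := by
      push_cast; omega
    rw [hmb, hia, PySem.List.slice_natCast]
    simp only [Int.toNat_natCast, Nat.add_sub_cancel]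
    exact hcore
  · rw [if_neg hne] at hcore ⊢
    exact hcore

-- ===== VERDICT (by name: the statement is the Claim_ definition above) =====
theorem get_list_from_string_spec : Claim_equal_get_list_from_string := by
  intro mystring variable_ delimiter _ _
  unfold Spec_get_list_from_string
  simp only [get_list_from_string, get_list_from_string_alt]
  have h0 : 0 ≤ PySem.Chars.find mystring.toList variable_.toList + (variable_.toList.length : Int) + 1 := by
    have := PySem.Chars.neg_one_le_find mystring.toList variable_.toList
    omega
  rw [core_final mystring.toList _ h0]
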